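-- pv_equiv track=rewrite | github.com/umsi-arwhyte/SI506-practice | problem_sets/ps_07-2020Fall/problem_set_07_solution.py | sort_candy
-- ===== SOURCE A (Python) =====
-- def sort_candy(candy_list):
--     '''
--     Uses the types dict to sort the candies in the candy_list by type
--
--     Parameters:
--         candy_list(list): a list of strings, each respresenting a different candy
--
--     Returns:
--         dict_types
--     '''
--     types = {
--         "chocolate" : [],
--         "fruit" : [],
--         "other" : []
--     }
--     for candy in candy_list:
--         if candy == "hershey bar" or candy == "snickers":
--             types["chocolate"].append(candy)
--         elif candy == "skittles" or candy == "starburst":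
--             types["fruit"].append(candy)
--         else:
--             types["other"].append(candy)
--     return types
-- ===== SOURCE B (Python) =====
-- CHOCOLATES = ("hershey bar", "snickers")
-- FRUITS = ("skittles", "starburst")
--
-- def sort_candy(candy_list):
--     return {
--         "chocolate": [c for c in candy_list if c in CHOCOLATES],
--         "fruit": [c for c in candy_list if c in FRUITS],
--         "other": [c for c in candy_list
--                   if c not in CHOCOLATES and c not in FRUITS],
--     }
-- ===== Notes on version B (the rewrite author's own statement) =====
-- stated objective: idiomatic
-- what changed: Replaces the single accumulating pass over a mutable three-bucket dict with three independent filter passes: the result dict is built directly from three list comprehensions, one per category, with no mutable accumulator.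
import Mathlib
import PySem

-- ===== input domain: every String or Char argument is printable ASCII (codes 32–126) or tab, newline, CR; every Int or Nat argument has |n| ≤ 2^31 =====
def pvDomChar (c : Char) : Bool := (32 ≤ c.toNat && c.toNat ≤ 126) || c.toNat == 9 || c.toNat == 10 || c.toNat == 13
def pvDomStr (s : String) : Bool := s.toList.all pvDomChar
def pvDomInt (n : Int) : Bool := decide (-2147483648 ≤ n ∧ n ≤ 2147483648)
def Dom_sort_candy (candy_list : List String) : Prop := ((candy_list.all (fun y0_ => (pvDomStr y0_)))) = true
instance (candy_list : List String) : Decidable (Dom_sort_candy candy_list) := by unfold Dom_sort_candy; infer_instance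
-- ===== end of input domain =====

-- B builds the result dict directly from three independent filter passes (one list
-- comprehension per category) instead of A's single accumulating pass into a mutable
-- three-bucket dict (idiomatic rewrite).

-- ===== PORT A =====
def sort_candy (candy_list : List String) : List (String × List String) :=
  let types : PySem.Dict String (List String) :=
    PySem.Dict.ofList [("chocolate", []), ("fruit", []), ("other", [])]
  (candy_list.foldl (fun d candy =>
    if candy == "hershey bar" || candy == "snickers" then
      d.modify "chocolate" [] (· ++ [candy])
    else if candy == "skittles" || candy == "starburst" then
      d.modify "fruit" [] (· ++ [candy])
    else
      d.modify "other" [] (· ++ [candy])) types).items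

-- ===== PORT B =====
def CHOCOLATES : List String := ["hershey bar", "snickers"]
def FRUITS : List String := ["skittles", "starburst"]

def sort_candy_alt (candy_list : List String) : List (String × List String) :=
  [("chocolate", candy_list.filter (fun c => CHOCOLATES.contains c)),
   ("fruit", candy_list.filter (fun c => FRUITS.contains c)),
   ("other", candy_list.filter (fun c => !CHOCOLATES.contains c && !FRUITS.contains c))]

-- ===== PRECONDITION & SPEC =====
def Spec_sort_candy (candy_list : List String) (out : List (String × List String)) : Prop := out = sort_candy_alt candy_list
instance (candy_list : List String) (out : List (String × List String)) : Decidable (Spec_sort_candy candy_list out) := by unfold Spec_sort_candy; infer_instance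

-- ===== CLAIM (what is proved, stated in full; the proofs are below) =====
def Claim_equal_sort_candy : Prop := ∀ (candy_list : List String), Dom_sort_candy candy_list → Spec_sort_candy candy_list (sort_candy candy_list)

-- ===== LEMMAS AND PROOFS =====
-- invariant of A's fold: the three buckets grow by exactly the three filters of the remaining list
lemma fold_inv (l : List String) (a b c : List String) :
    l.foldl (fun d candy =>
      if candy == "hershey bar" || candy == "snickers" then
        d.modify "chocolate" [] (· ++ [candy])
      else if candy == "skittles" || candy == "starburst" then
        d.modify "fruit" [] (· ++ [candy])
      else
        d.modify "other" [] (· ++ [candy]))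
      (PySem.Dict.mk [("chocolate", a), ("fruit", b), ("other", c)])
    = PySem.Dict.mk [("chocolate", a ++ l.filter (fun x => CHOCOLATES.contains x)),
        ("fruit", b ++ l.filter (fun x => FRUITS.contains x)),
        ("other", c ++ l.filter (fun x => !CHOCOLATES.contains x && !FRUITS.contains x))] := by
  induction l generalizing a b c with
  | nil => simp
  | cons x xs ih =>
    simp only [List.foldl_cons]
    by_cases h1 : x == "hershey bar" || x == "snickers"
    · have hx : x = "hershey bar" ∨ x = "snickers" := by
        simpa [Bool.or_eq_true] using h1
      have hmod : (PySem.Dict.mk [("chocolate", a), ("fruit", b), ("other", c)]).modify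
          "chocolate" [] (· ++ [x])
          = PySem.Dict.mk [("chocolate", a ++ [x]), ("fruit", b), ("other", c)] := by
        rfl
      rw [if_pos h1, hmod, ih]
      rcases hx with rfl | rfl <;> simp [CHOCOLATES, FRUITS]
    · by_cases h2 : x == "skittles" || x == "starburst"
      · have hx : x = "skittles" ∨ x = "starburst" := by
          simpa [Bool.or_eq_true] using h2
        have hne := h1
        simp only [Bool.or_eq_true, beq_iff_eq, not_or] at hne
        have hmod : (PySem.Dict.mk [("chocolate", a), ("fruit", b), ("other", c)]).modify
            "fruit" [] (· ++ [x])
            = PySem.Dict.mk [("chocolate", a), ("fruit", b ++ [x]), ("other", c)] := by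
          rfl
        rw [if_neg (by simpa using h1), if_pos h2, hmod, ih]
        rcases hx with rfl | rfl <;> simp [CHOCOLATES, FRUITS]
      · have hn1 : ¬(x = "hershey bar") ∧ ¬(x = "snickers") := by
          simpa [Bool.or_eq_true, not_or] using h1
        have hn2 : ¬(x = "skittles") ∧ ¬(x = "starburst") := by
          simpa [Bool.or_eq_true, not_or] using h2
        have hmod : (PySem.Dict.mk [("chocolate", a), ("fruit", b), ("other", c)]).modify
            "other" [] (· ++ [x])
            = PySem.Dict.mk [("chocolate", a), ("fruit", b), ("other", c ++ [x])] := by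
          rfl
        rw [if_neg (by simpa using h1), if_neg (by simpa using h2), hmod, ih]
        simp [CHOCOLATES, FRUITS, hn1.1, hn1.2, hn2.1, hn2.2]

-- ===== VERDICT (by name: the statement is the Claim_ definition above) =====
theorem sort_candy_spec : Claim_equal_sort_candy := by
  intro candy_list _
  unfold Spec_sort_candy sort_candy sort_candy_alt
  have h0 : (PySem.Dict.ofList [("chocolate", ([] : List String)), ("fruit", []), ("other", [])])
      = PySem.Dict.mk [("chocolate", []), ("fruit", []), ("other", [])] := by rfl
  simp only [h0, fold_inv]
  rfl
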